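-- pv_equiv track=rewrite | github.com/midsphere-ai/exo | tests/integration/helpers/mcp_test_server.py | get_large_dataset
-- ===== SOURCE A (Python) =====
-- def get_large_dataset(topic: str) -> str:
--     """Return a large dataset about the given topic (>10 KB for workspace offload testing).
--
--     Args:
--         topic: The topic to generate data about.
--
--     Returns:
--         A large dataset string containing data about the topic.
--         Always includes EXO_DATASET_KEYWORD_2024 for test verification.
--     """
--     keyword = "EXO_DATASET_KEYWORD_2024"
--     header = (
--         f"=== LARGE DATASET: {topic.upper()} ===\n"
--         f"IDENTIFICATION_KEYWORD: {keyword}\n"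
--         f"This dataset contains comprehensive information about {topic}.\n"
--         "It is intentionally large to test workspace offloading in the Exo framework.\n\n"
--     )
--     # Pad to exactly 15 KB (15360 bytes) with data entries
--     target_bytes = 15 * 1024
--     content = header
--     entry_num = 0
--     while len(content.encode("utf-8")) < target_bytes:
--         content += (
--             f"DATA_ENTRY[{entry_num}]: Detailed information about {topic} "
--             f"— entry {entry_num} contains extensive measurements, "
--             "observations, and related scientific data. " + "x" * 40 + "\n"
--         )
--         entry_num += 1
--     # Trim to at most target_bytes, preserving UTF-8 boundaries
--     encoded = content.encode("utf-8")
--     if len(encoded) > target_bytes: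
--         content = encoded[:target_bytes].decode("utf-8", errors="ignore")
--     return content
-- ===== SOURCE B (Python) =====
-- def get_large_dataset(topic: str) -> str:
--     """Return a large dataset about the given topic (>10 KB for workspace offload testing)."""
--     keyword = "EXO_DATASET_KEYWORD_2024"
--     header = (
--         f"=== LARGE DATASET: {topic.upper()} ===\n"
--         f"IDENTIFICATION_KEYWORD: {keyword}\n"
--         f"This dataset contains comprehensive information about {topic}.\n"
--         "It is intentionally large to test workspace offloading in the Exo framework.\n\n"
--     )
--     target_bytes = 15 * 1024
--     # Collect pieces in a list and track the byte size arithmetically: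
--     # each piece is encoded once, instead of re-encoding the whole string per iteration.
--     pieces = [header]
--     size = len(header.encode("utf-8"))
--     entry_num = 0
--     while size < target_bytes:
--         piece = (
--             f"DATA_ENTRY[{entry_num}]: Detailed information about {topic} "
--             f"— entry {entry_num} contains extensive measurements, "
--             "observations, and related scientific data. " + "x" * 40 + "\n"
--         )
--         size += len(piece.encode("utf-8"))
--         pieces.append(piece)
--         entry_num += 1
--     content = "".join(pieces)
--     # Trim to at most target_bytes on a character boundary: keep the maximal
--     # prefix of characters whose total UTF-8 length fits in the budget.
--     if size > target_bytes:
--         keep = 0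
--         budget = target_bytes
--         for ch in content:
--             b = len(ch.encode("utf-8"))
--             if b > budget:
--                 break
--             budget -= b
--             keep += 1
--         content = content[:keep]
--     return content
-- ===== Notes on version B (the rewrite author's own statement) =====
-- stated objective: alternative
-- what changed: B collects entry pieces in a list with an arithmetic running byte counter (each piece encoded once) and joins once, instead of A's string concatenation with a full re-encode of the growing content every iteration; the final trim counts characters against a byte budget instead of encode/slice/decode.
import Mathlib
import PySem

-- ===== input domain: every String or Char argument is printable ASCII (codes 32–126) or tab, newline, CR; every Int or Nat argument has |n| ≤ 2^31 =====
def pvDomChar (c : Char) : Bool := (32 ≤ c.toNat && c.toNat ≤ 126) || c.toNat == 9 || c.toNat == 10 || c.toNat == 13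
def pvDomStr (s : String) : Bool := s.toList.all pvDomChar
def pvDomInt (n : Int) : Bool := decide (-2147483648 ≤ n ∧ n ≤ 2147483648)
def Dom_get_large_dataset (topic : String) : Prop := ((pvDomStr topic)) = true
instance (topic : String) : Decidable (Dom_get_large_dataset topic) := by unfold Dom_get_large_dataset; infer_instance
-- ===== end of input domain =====

-- B collects the entry pieces in a list with an arithmetic running byte count and joins once
-- (A re-encodes the whole growing string every iteration); return values proved equal for all inputs.

-- target_bytes = 15 * 1024 (both Pythons)
def targetBytes : Nat := 15 * 1024

-- Shared modeling helpers: number of bytes of a char / a string (as List Char) under UTF-8,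
-- modeling len(s.encode("utf-8")) exactly (both Pythons use it on valid non-surrogate text).
def charBytes (c : Char) : Nat :=
  if c.toNat < 128 then 1 else if c.toNat < 2048 then 2 else if c.toNat < 65536 then 3 else 4

def utf8Len (cs : List Char) : Nat := cs.foldl (fun a c => a + charBytes c) 0

theorem utf8Len_foldl_eq (cs : List Char) : ∀ (a : Nat),
    cs.foldl (fun a c => a + charBytes c) a = a + (cs.map charBytes).sum := by
  induction cs with
  | nil => simp
  | cons c cs ih => intro a; simp only [List.foldl_cons, List.map_cons, List.sum_cons, ih]; omega

theorem utf8Len_eq_sum (cs : List Char) : utf8Len cs = (cs.map charBytes).sum := by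
  simpa using utf8Len_foldl_eq cs 0

theorem utf8Len_append (a b : List Char) : utf8Len (a ++ b) = utf8Len a + utf8Len b := by
  simp [utf8Len_eq_sum]

-- The header f-string (identical literal in both Pythons).
def headerChars (topic : String) : List Char :=
  "=== LARGE DATASET: ".toList ++ (PySem.Str.upper topic).toList ++ " ===\n".toList ++
  "IDENTIFICATION_KEYWORD: EXO_DATASET_KEYWORD_2024\n".toList ++
  "This dataset contains comprehensive information about ".toList ++ topic.toList ++ ".\n".toList ++
  "It is intentionally large to test workspace offloading in the Exo framework.\n\n".toList

-- One DATA_ENTRY piece (identical f-string literal in both Pythons); "x" * 40 = replicate 40 'x'.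
def entryChars (topic : String) (n : Nat) : List Char :=
  "DATA_ENTRY[".toList ++ (PySem.Int.toStr (n : Int)).toList ++
  "]: Detailed information about ".toList ++ topic.toList ++
  " — entry ".toList ++ (PySem.Int.toStr (n : Int)).toList ++
  " contains extensive measurements, observations, and related scientific data. ".toList ++
  List.replicate 40 'x' ++ "\n".toList

theorem one_le_utf8Len_entry (topic : String) (n : Nat) : 1 ≤ utf8Len (entryChars topic n) := by
  have h : utf8Len ("DATA_ENTRY[".toList) = 11 := by decide
  simp only [entryChars, utf8Len_append]
  omega

-- ===== PORT A =====
-- A's while loop: content grows by one entry while len(content.encode("utf-8")) < targetBytes.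
def loopA (topic : String) (content : List Char) (n : Nat) : List Char :=
  if utf8Len content < targetBytes then loopA topic (content ++ entryChars topic n) (n + 1) else content
termination_by targetBytes - utf8Len content
decreasing_by
  rw [utf8Len_append]
  have := one_le_utf8Len_entry topic n
  omega

-- A's trim: encoded[:targetBytes].decode("utf-8", errors="ignore").  On this valid UTF-8 stream the
-- byte slice is exact up to a possibly truncated final character, which errors="ignore" drops:
-- ported exactly as keeping the maximal character prefix whose total byte length ≤ the budget.
def trimA (budget : Nat) (cs : List Char) (acc : List Char) : List Char :=
  match cs with
  | [] => acc.reverse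
  | c :: cs' => if charBytes c ≤ budget then trimA (budget - charBytes c) cs' (c :: acc) else acc.reverse

def get_large_dataset (topic : String) : String :=
  let content := loopA topic (headerChars topic) 0
  if targetBytes < utf8Len content then String.ofList (trimA targetBytes content []) else String.ofList content

-- ===== PORT B =====
-- B's loop: collect the pieces in a list, tracking the byte size arithmetically; returns (pieces, size).
def buildB (topic : String) (size : Nat) (n : Nat) : List (List Char) × Nat :=
  if size < targetBytes then
    let piece := entryChars topic n
    let rest := buildB topic (size + utf8Len piece) (n + 1)
    (piece :: rest.1, rest.2)
  else ([], size)
termination_by targetBytes - size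
decreasing_by
  have := one_le_utf8Len_entry topic n
  omega

-- B's trim loop: count how many leading characters fit in the byte budget (for/break in Source B).
def keepB (budget : Nat) (cs : List Char) (keep : Nat) : Nat :=
  match cs with
  | [] => keep
  | c :: cs' => if budget < charBytes c then keep else keepB (budget - charBytes c) cs' (keep + 1)

def get_large_dataset_alt (topic : String) : String :=
  let header := headerChars topic
  let r := buildB topic (utf8Len header) 0
  let content := header ++ r.1.flatten
  if targetBytes < r.2 then String.ofList (List.take (keepB targetBytes content 0) content) else String.ofList content

-- ===== PRECONDITION & SPEC =====
def Spec_get_large_dataset (topic : String) (out : String) : Prop := out = get_large_dataset_alt topic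
instance (topic : String) (out : String) : Decidable (Spec_get_large_dataset topic out) := by unfold Spec_get_large_dataset; infer_instance

-- ===== CLAIM (what is proved, stated in full; the proofs are below) =====
def Claim_equal_get_large_dataset : Prop := ∀ (topic : String), Dom_get_large_dataset topic → Spec_get_large_dataset topic (get_large_dataset topic)

-- ===== LEMMAS AND PROOFS =====

-- A's string loop and B's piece loop produce the same content and B's counter is its byte length.
theorem loop_build (topic : String) : ∀ (k : Nat) (content : List Char) (n : Nat),
    targetBytes - utf8Len content ≤ k →
    loopA topic content n = content ++ ((buildB topic (utf8Len content) n).1).flatten ∧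
    (buildB topic (utf8Len content) n).2 = utf8Len (loopA topic content n) := by
  intro k
  induction k with
  | zero =>
    intro content n h
    have hc : ¬ utf8Len content < targetBytes := by omega
    rw [loopA, buildB]
    simp [hc]
  | succ k ih =>
    intro content n h
    by_cases hc : utf8Len content < targetBytes
    · have hlen : utf8Len (content ++ entryChars topic n) = utf8Len content + utf8Len (entryChars topic n) :=
        utf8Len_append _ _
      have hk : targetBytes - utf8Len (content ++ entryChars topic n) ≤ k := by
        have := one_le_utf8Len_entry topic n
        omega
      obtain ⟨h1, h2⟩ := ih (content ++ entryChars topic n) (n + 1) hk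
      rw [loopA, buildB]
      simp only [if_pos hc]
      rw [← hlen]
      refine ⟨?_, by simpa using h2⟩
      rw [h1]
      simp [List.append_assoc]
    · rw [loopA, buildB]
      simp [hc]

-- B's kept-character counter only shifts with its accumulator.
theorem keepB_shift : ∀ (cs : List Char) (budget k : Nat),
    keepB budget cs k = k + keepB budget cs 0 := by
  intro cs
  induction cs with
  | nil => intro budget k; simp [keepB]
  | cons c cs' ih =>
    intro budget k
    by_cases h : budget < charBytes c
    · simp [keepB, h]
    · simp only [keepB, if_neg h]
      rw [ih _ (k + 1), ih _ 1]
      omega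

-- A's byte-budget trim keeps exactly the first keepB characters.
theorem trim_keep : ∀ (cs : List Char) (budget : Nat) (acc : List Char),
    trimA budget cs acc = acc.reverse ++ cs.take (keepB budget cs 0) := by
  intro cs
  induction cs with
  | nil => intro budget acc; simp [trimA, keepB]
  | cons c cs' ih =>
    intro budget acc
    by_cases h : charBytes c ≤ budget
    · have h' : ¬ budget < charBytes c := by omega
      simp only [trimA, keepB, if_pos h, if_neg h']
      rw [ih, keepB_shift cs' _ 1]
      simp [Nat.add_comm]
    · have h' : budget < charBytes c := by omega
      simp [trimA, keepB, if_neg h, if_pos h']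

-- ===== VERDICT (by name: the statement is the Claim_ definition above) =====
theorem get_large_dataset_spec : Claim_equal_get_large_dataset := by
  intro topic _
  unfold Spec_get_large_dataset get_large_dataset get_large_dataset_alt
  obtain ⟨h1, h2⟩ := loop_build topic targetBytes (headerChars topic) 0 (by omega)
  simp only [← h1, h2]
  by_cases hc : targetBytes < utf8Len (loopA topic (headerChars topic) 0)
  · simp [hc, trim_keep]
  · simp [hc]
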